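-- pv_equiv track=rewrite | github.com/Bobcatsoap/jy-server | cell/RoomType13Calculator.py | find_double
-- ===== SOURCE A (Python) =====
-- def find_double(pre_card_val, card2, room_info):
--     """
--     找到手牌大于指定牌的所有对
--     对方前面
--     """
--     if len(card2) < 2:
--         return []
--     card_filter = set()
--     itm_cards = []
--     for k in card2:
--         if k > pre_card_val and card2.count(k) == 2 and k not in card_filter:
--             itm_cards.append([k, k])
--             card_filter.add(k)
--
--     for k in card2:
--         if k > pre_card_val and card2.count(k) > 2 and k not in card_filter:
--             itm_cards.append([k, k])
--             card_filter.add(k)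
--     return itm_cards
-- ===== SOURCE B (Python) =====
-- def find_double(pre_card_val, card2, room_info):
--     """O(n): one counting pass, then ONE pass over card2 with a seen-set that
--     routes each new qualifying value into one of two buckets (exactly-2 / more-than-2);
--     the buckets are concatenated at the end. No staged scans, no repeated counting."""
--     if len(card2) < 2:
--         return []
--     counts = {}
--     for k in card2:
--         counts[k] = counts.get(k, 0) + 1
--     pairs, extras = [], []
--     seen = set()
--     for k in card2:
--         if k > pre_card_val and k not in seen:
--             seen.add(k)
--             c = counts[k]
--             if c == 2:
--                 pairs.append([k, k])
--             elif c > 2: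
--                 extras.append([k, k])
--     return pairs + extras
-- ===== Notes on version B (the rewrite author's own statement) =====
-- stated objective: faster
-- what changed: A makes two staged ordered scans, each recomputing card2.count(k) (quadratic); B builds a count dict once and then makes a single pass with a seen-set that routes each new qualifying value into one of two buckets (==2 vs >2), concatenated at the end.
import Mathlib
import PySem

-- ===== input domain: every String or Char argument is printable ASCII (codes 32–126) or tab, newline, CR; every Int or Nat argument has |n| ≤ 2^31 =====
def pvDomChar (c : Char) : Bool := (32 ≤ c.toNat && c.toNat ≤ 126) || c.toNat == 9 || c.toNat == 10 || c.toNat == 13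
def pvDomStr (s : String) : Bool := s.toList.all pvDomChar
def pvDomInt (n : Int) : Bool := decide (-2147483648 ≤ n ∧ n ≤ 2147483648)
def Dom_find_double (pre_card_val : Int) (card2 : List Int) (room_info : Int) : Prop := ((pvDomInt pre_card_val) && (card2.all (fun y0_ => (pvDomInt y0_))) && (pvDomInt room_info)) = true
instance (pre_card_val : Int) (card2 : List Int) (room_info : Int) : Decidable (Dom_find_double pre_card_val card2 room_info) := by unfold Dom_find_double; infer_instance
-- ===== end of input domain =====

-- find_double: B replaces A's two staged quadratic re-counting scans by one counting-dict
-- pass and ONE pass routing each new qualifying value into two buckets (objective: faster, asymptotic).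


-- ===== PORT A =====
-- literal transliteration: guard, then two passes over card2, each appending [k,k]
-- for unseen k with card2.count(k) == 2 (resp. > 2), carrying the seen-set between passes
def find_double (pre_card_val : Int) (card2 : List Int) (room_info : Int) : List (List Int) :=
  if card2.length < 2 then []
  else
    let st1 : PySem.Set Int × List (List Int) :=
      card2.foldl (fun st k =>
        if (k > pre_card_val ∧ PySem.List.count card2 k = 2) ∧ st.1.contains k = false then
          (st.1.add k, st.2 ++ [[k, k]])
        else st) (PySem.Set.empty, [])
    let st2 : PySem.Set Int × List (List Int) :=
      card2.foldl (fun st k =>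
        if (k > pre_card_val ∧ PySem.List.count card2 k > 2) ∧ st.1.contains k = false then
          (st.1.add k, st.2 ++ [[k, k]])
        else st) st1
    st2.2

-- ===== PORT B =====
-- one counting pass, then a SINGLE pass over card2 with a seen-set routing each new
-- qualifying value into the pairs (count == 2) or extras (count > 2) bucket; buckets concatenated
def find_double_alt (pre_card_val : Int) (card2 : List Int) (room_info : Int) : List (List Int) :=
  if card2.length < 2 then []
  else
    let counts : PySem.Dict Int Int :=
      card2.foldl (fun d k => d.insert k (d.getD k 0 + 1)) PySem.Dict.empty
    let st : List (List Int) × List (List Int) × PySem.Set Int :=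
      card2.foldl (fun st k =>
        if k > pre_card_val ∧ st.2.2.contains k = false then
          if counts.getD k 0 = 2 then (st.1 ++ [[k, k]], st.2.1, st.2.2.add k)
          else if counts.getD k 0 > 2 then (st.1, st.2.1 ++ [[k, k]], st.2.2.add k)
          else (st.1, st.2.1, st.2.2.add k)
        else st) ([], [], PySem.Set.empty)
    st.1 ++ st.2.1

-- ===== PRECONDITION & SPEC =====
def Spec_find_double (pre_card_val : Int) (card2 : List Int) (room_info : Int) (out : List (List Int)) : Prop := out = find_double_alt pre_card_val card2 room_info
instance (pre_card_val : Int) (card2 : List Int) (room_info : Int) (out : List (List Int)) : Decidable (Spec_find_double pre_card_val card2 room_info out) := by unfold Spec_find_double; infer_instance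

-- ===== CLAIM (what is proved, stated in full; the proofs are below) =====
def Claim_equal_find_double : Prop := ∀ (pre_card_val : Int) (card2 : List Int) (room_info : Int), Dom_find_double pre_card_val card2 room_info → Spec_find_double pre_card_val card2 room_info (find_double pre_card_val card2 room_info)

-- ===== LEMMAS AND PROOFS =====

theorem pvSet_contains_add (s : PySem.Set Int) (k j : Int) :
    (s.add k).contains j = (s.contains j || k == j) := by
  simp only [PySem.Set.add, PySem.Set.contains] at *
  split <;> rename_i h
  · cases hkj : k == j
    · simp
    · have : k = j := by simpa using hkj
      subst this; simp_all
  · cases hkj : k == j <;> simp_all <;> omega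

-- first-occurrence traversal relative to an already-seen set
def foSeen (t : PySem.Set Int) : List Int → List Int
  | [] => []
  | k :: ks => if t.contains k then foSeen t ks else k :: foSeen (t.add k) ks

-- the first loop of A: its output is the filter of the first-occurrence list
theorem loop1_snd (pv : Int) (c2 : List Int) :
    ∀ (l : List Int) (s t : PySem.Set Int) (acc : List (List Int)),
    (∀ j : Int, (j > pv ∧ PySem.List.count c2 j = 2) → s.contains j = t.contains j) →
    (l.foldl (fun st k =>
        if (k > pv ∧ PySem.List.count c2 k = 2) ∧ st.1.contains k = false then
          (st.1.add k, st.2 ++ [[k, k]])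
        else st) (s, acc)).2
      = acc ++ ((foSeen t l).filter (fun k => decide (k > pv ∧ PySem.List.count c2 k = 2))).map
          (fun k => ([k, k] : List Int)) := by
  intro l
  induction l with
  | nil => intro s t acc H; simp [foSeen]
  | cons k ks ih =>
    intro s t acc H
    rw [List.foldl_cons]
    by_cases hP : k > pv ∧ PySem.List.count c2 k = 2
    · by_cases hs : s.contains k = true
      · have htk : t.contains k = true := (H k hP) ▸ hs
        have hm : k ∈ s := by simpa [PySem.Set.contains] using hs
        rw [if_neg (by simp [hm])]
        rw [ih s t acc H]
        have hmt : k ∈ t := by simpa [PySem.Set.contains] using htk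
        simp [foSeen, hmt, Bool.decide_and]
      · have hsf : s.contains k = false := by simpa using hs
        have htk : t.contains k = false := by rw [← H k hP]; exact hsf
        rw [if_pos ⟨hP, hsf⟩]
        rw [ih (s.add k) (t.add k) (acc ++ [[k, k]]) (by
          intro j hj
          rw [pvSet_contains_add, pvSet_contains_add, H j hj])]
        have hmt : ¬ k ∈ t := by simpa [PySem.Set.contains] using htk
        have d1 : decide (pv < k) = true := decide_eq_true hP.1
        have d2 : List.count k c2 = 2 := by simpa using hP.2
        simp [foSeen, hmt, d1, d2, Bool.decide_and, List.append_assoc]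
    · rw [if_neg (fun hC => hP hC.1)]
      by_cases htk : t.contains k = true
      · rw [ih s t acc H]
        have hmt : k ∈ t := by simpa [PySem.Set.contains] using htk
        simp [foSeen, hmt, Bool.decide_and]
      · have htkf : t.contains k = false := by simpa using htk
        rw [ih s (t.add k) acc (by
          intro j hj
          have hkj : (k == j) = false := by
            simp only [beq_eq_false_iff_ne]
            intro e; exact hP (e ▸ hj)
          rw [pvSet_contains_add, hkj, Bool.or_false, H j hj])]
        have hmt : ¬ k ∈ t := by simpa [PySem.Set.contains] using htk
        have hd : (decide (pv < k) && decide (List.count k c2 = 2)) = false := by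
          simpa [Bool.decide_and] using hP
        simp [foSeen, hmt, hd, Bool.decide_and]

theorem loop1_fst (pv : Int) (c2 : List Int) :
    ∀ (l : List Int) (s : PySem.Set Int) (acc : List (List Int)) (j : Int),
    (l.foldl (fun st k =>
        if (k > pv ∧ PySem.List.count c2 k = 2) ∧ st.1.contains k = false then
          (st.1.add k, st.2 ++ [[k, k]])
        else st) (s, acc)).1.contains j
      = (s.contains j || (decide (j > pv ∧ PySem.List.count c2 j = 2) && l.contains j)) := by
  intro l
  induction l with
  | nil => intro s acc j; simp
  | cons k ks ih =>
    intro s acc j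
    rw [List.foldl_cons]
    by_cases hC : (k > pv ∧ PySem.List.count c2 k = 2) ∧ s.contains k = false
    · rw [if_pos hC]
      rw [ih]
      rw [pvSet_contains_add]
      by_cases hj : j = k
      · subst hj
        have hc2 : List.count j c2 = 2 := by simpa using hC.1.2
        simp [hC.1.1, hc2]
      · have hkj : (k == j) = false := by simp [Ne.symm hj]
        simp [hkj, hj]
    · rw [if_neg hC]
      rw [ih]
      by_cases hj : j = k
      · subst hj
        by_cases hPj : j > pv ∧ PySem.List.count c2 j = 2
        · have hs : s.contains j = true := by
            rcases Bool.eq_false_or_eq_true (s.contains j) with h | h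
            · exact h
            · exact absurd ⟨hPj, h⟩ hC
          have hm : j ∈ s := by simpa [PySem.Set.contains] using hs
          simp [hm]
        · have hd : (decide (pv < j) && decide (List.count j c2 = 2)) = false := by
            simpa [Bool.decide_and] using hPj
          simp [hd]
      · simp [hj]

theorem loop2_snd (pv : Int) (c2 : List Int) :
    ∀ (l : List Int) (st0 : PySem.Set Int × List (List Int)) (t : PySem.Set Int),
    (∀ j : Int, (j > pv ∧ PySem.List.count c2 j > 2) → st0.1.contains j = t.contains j) →
    (l.foldl (fun st k =>
        if (k > pv ∧ PySem.List.count c2 k > 2) ∧ st.1.contains k = false then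
          (st.1.add k, st.2 ++ [[k, k]])
        else st) st0).2
      = st0.2 ++ ((foSeen t l).filter (fun k => decide (k > pv ∧ PySem.List.count c2 k > 2))).map
          (fun k => ([k, k] : List Int)) := by
  intro l
  induction l with
  | nil => intro st0 t H; simp [foSeen]
  | cons k ks ih =>
    intro st0 t H
    rw [List.foldl_cons]
    by_cases hP : k > pv ∧ PySem.List.count c2 k > 2
    · by_cases hs : st0.1.contains k = true
      · have htk : t.contains k = true := (H k hP) ▸ hs
        have hm : k ∈ st0.1 := by simpa [PySem.Set.contains] using hs
        rw [if_neg (by simp [hm])]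
        rw [ih st0 t H]
        have hmt : k ∈ t := by simpa [PySem.Set.contains] using htk
        simp [foSeen, hmt, Bool.decide_and]
      · have hsf : st0.1.contains k = false := by simpa using hs
        have htk : t.contains k = false := by rw [← H k hP]; exact hsf
        rw [if_pos ⟨hP, hsf⟩]
        rw [ih (st0.1.add k, st0.2 ++ [[k, k]]) (t.add k) (by
          intro j hj
          rw [pvSet_contains_add, pvSet_contains_add, H j hj])]
        have hmt : ¬ k ∈ t := by simpa [PySem.Set.contains] using htk
        have d1 : decide (pv < k) = true := decide_eq_true hP.1
        have d2 : 2 < List.count k c2 := by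
          have := hP.2; simpa using this
        simp [foSeen, hmt, d1, d2, Bool.decide_and, List.append_assoc]
    · rw [if_neg (fun hC => hP hC.1)]
      by_cases htk : t.contains k = true
      · rw [ih st0 t H]
        have hmt : k ∈ t := by simpa [PySem.Set.contains] using htk
        simp [foSeen, hmt, Bool.decide_and]
      · have htkf : t.contains k = false := by simpa using htk
        rw [ih st0 (t.add k) (by
          intro j hj
          have hkj : (k == j) = false := by
            simp only [beq_eq_false_iff_ne]
            intro e; exact hP (e ▸ hj)
          rw [pvSet_contains_add, hkj, Bool.or_false, H j hj])]
        have hmt : ¬ k ∈ t := by simpa [PySem.Set.contains] using htk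
        have hd : (decide (pv < k) && decide (2 < List.count k c2)) = false := by
          simpa [Bool.decide_and] using hP
        simp [foSeen, hmt, hd, Bool.decide_and]

-- B's single pass: both buckets are filters of the first-occurrence list
theorem loopB (pv : Int) (d : PySem.Dict Int Int) :
    ∀ (l : List Int) (s t : PySem.Set Int) (p e : List (List Int)),
    (∀ j : Int, j > pv → s.contains j = t.contains j) →
    (l.foldl (fun st k =>
        if k > pv ∧ st.2.2.contains k = false then
          if d.getD k 0 = 2 then (st.1 ++ [[k, k]], st.2.1, st.2.2.add k)
          else if d.getD k 0 > 2 then (st.1, st.2.1 ++ [[k, k]], st.2.2.add k)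
          else (st.1, st.2.1, st.2.2.add k)
        else st) (p, e, s)).1
      = p ++ ((foSeen t l).filter (fun k => decide (k > pv ∧ d.getD k 0 = 2))).map
          (fun k => ([k, k] : List Int))
    ∧ (l.foldl (fun st k =>
        if k > pv ∧ st.2.2.contains k = false then
          if d.getD k 0 = 2 then (st.1 ++ [[k, k]], st.2.1, st.2.2.add k)
          else if d.getD k 0 > 2 then (st.1, st.2.1 ++ [[k, k]], st.2.2.add k)
          else (st.1, st.2.1, st.2.2.add k)
        else st) (p, e, s)).2.1
      = e ++ ((foSeen t l).filter (fun k => decide (k > pv ∧ d.getD k 0 > 2))).map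
          (fun k => ([k, k] : List Int)) := by
  intro l
  induction l with
  | nil => intro s t p e H; simp [foSeen]
  | cons k ks ih =>
    intro s t p e H
    rw [List.foldl_cons]
    dsimp only
    by_cases hk : k > pv
    · by_cases hs : s.contains k = true
      · have htk : t.contains k = true := (H k hk) ▸ hs
        have hmt : k ∈ t := by simpa [PySem.Set.contains] using htk
        have hms : k ∈ s := by simpa [PySem.Set.contains] using hs
        rw [if_neg (by simp [hms])]
        have := ih s t p e H
        simp only [foSeen, if_pos htk]
        exact this
      · have hsf : s.contains k = false := by simpa using hs
        have htk : t.contains k = false := by rw [← H k hk]; exact hsf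
        have hmt : ¬ k ∈ t := by simpa [PySem.Set.contains] using htk
        rw [if_pos ⟨hk, hsf⟩]
        have Hnext : ∀ j : Int, j > pv → (s.add k).contains j = (t.add k).contains j := by
          intro j hj
          rw [pvSet_contains_add, pvSet_contains_add, H j hj]
        have d1 : decide (pv < k) = true := decide_eq_true hk
        by_cases hc2 : d.getD k 0 = 2
        · rw [if_pos hc2]
          have := ih (s.add k) (t.add k) (p ++ [[k, k]]) e Hnext
          refine ⟨?_, ?_⟩
          · rw [this.1]
            simp [foSeen, hmt, d1, hc2, Bool.decide_and, List.append_assoc]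
          · rw [this.2]
            simp [foSeen, hmt, d1, hc2, Bool.decide_and]
        · rw [if_neg hc2]
          by_cases hc3 : d.getD k 0 > 2
          · rw [if_pos hc3]
            have := ih (s.add k) (t.add k) p (e ++ [[k, k]]) Hnext
            refine ⟨?_, ?_⟩
            · rw [this.1]
              simp [foSeen, hmt, d1, hc2, Bool.decide_and]
            · rw [this.2]
              simp [foSeen, hmt, d1, hc3, Bool.decide_and, List.append_assoc]
          · rw [if_neg hc3]
            have := ih (s.add k) (t.add k) p e Hnext
            refine ⟨?_, ?_⟩
            · rw [this.1]
              simp [foSeen, hmt, d1, hc2, Bool.decide_and]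
            · rw [this.2]
              simp [foSeen, hmt, d1, hc3, Bool.decide_and]
    · rw [if_neg (fun hC => hk hC.1)]
      by_cases htk : t.contains k = true
      · have := ih s t p e H
        simp only [foSeen, if_pos htk]
        exact this
      · have htkf : t.contains k = false := by simpa using htk
        have hmt : ¬ k ∈ t := by simpa [PySem.Set.contains] using htkf
        have Hnext : ∀ j : Int, j > pv → s.contains j = (t.add k).contains j := by
          intro j hj
          have hkj : (k == j) = false := by
            simp only [beq_eq_false_iff_ne]
            intro e'; exact hk (e' ▸ hj)
          rw [pvSet_contains_add, hkj, Bool.or_false, H j hj]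
        have := ih s (t.add k) p e Hnext
        have dk : decide (pv < k) = false := by simpa using hk
        refine ⟨?_, ?_⟩
        · rw [this.1]; simp [foSeen, hmt, dk, Bool.decide_and]
        · rw [this.2]; simp [foSeen, hmt, dk, Bool.decide_and]

theorem countsD : ∀ (l : List Int) (d : PySem.Dict Int Int) (k : Int),
    (l.foldl (fun d x => d.insert x (d.getD x 0 + 1)) d).getD k 0
      = d.getD k 0 + (l.count k : Int) := by
  intro l
  induction l with
  | nil => intro d k; simp
  | cons x xs ih =>
    intro d k
    rw [List.foldl_cons, ih, PySem.Dict.getD_insert]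
    by_cases h : k = x
    · subst h; simp; ring
    · simp [h, Ne.symm h]

theorem main_eq (pv : Int) (c2 : List Int) (ri : Int) :
    find_double pv c2 ri = find_double_alt pv c2 ri := by
  unfold find_double find_double_alt
  by_cases hlen : c2.length < 2
  · simp [hlen]
  · rw [if_neg hlen, if_neg hlen]
    dsimp only
    have h1 := loop1_snd pv c2 c2 PySem.Set.empty PySem.Set.empty [] (fun j _ => rfl)
    have hS1 : ∀ j : Int, (j > pv ∧ PySem.List.count c2 j > 2) →
        (c2.foldl (fun st k =>
          if (k > pv ∧ PySem.List.count c2 k = 2) ∧ st.1.contains k = false then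
            (st.1.add k, st.2 ++ [[k, k]])
          else st) ((PySem.Set.empty : PySem.Set Int), ([] : List (List Int)))).1.contains j
          = (PySem.Set.empty : PySem.Set Int).contains j := by
      intro j hj
      rw [loop1_fst]
      have hn : ¬(j > pv ∧ PySem.List.count c2 j = 2) := by
        rintro ⟨-, h2⟩
        have h3 : 2 < List.count j c2 := by simpa using hj.2
        have h4 : List.count j c2 = 2 := by simpa using h2
        omega
      have hd : (decide (pv < j) && decide (List.count j c2 = 2)) = false := by
        simpa [Bool.decide_and] using hn
      simp [hd]
    have h2 := loop2_snd pv c2 c2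
      (c2.foldl (fun st k =>
        if (k > pv ∧ PySem.List.count c2 k = 2) ∧ st.1.contains k = false then
          (st.1.add k, st.2 ++ [[k, k]])
        else st) ((PySem.Set.empty : PySem.Set Int), ([] : List (List Int))))
      PySem.Set.empty hS1
    have hB := loopB pv
      (c2.foldl (fun d k => d.insert k (d.getD k 0 + 1)) (PySem.Dict.empty : PySem.Dict Int Int))
      c2 PySem.Set.empty PySem.Set.empty [] [] (fun j _ => rfl)
    rw [h2, h1, hB.1, hB.2]
    have e1 : ∀ L : List Int, L.filter
        (fun k => decide (k > pv ∧
          (c2.foldl (fun d k => d.insert k (d.getD k 0 + 1)) (PySem.Dict.empty : PySem.Dict Int Int)).getD k 0 = 2))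
      = L.filter (fun k => decide (k > pv ∧ PySem.List.count c2 k = 2)) := by
      intro L
      apply List.filter_congr
      intro x _
      rw [decide_eq_decide]
      simp only [countsD]
      constructor <;> rintro ⟨ha, hb⟩ <;> refine ⟨ha, ?_⟩
      · simp at hb ⊢; omega
      · simp at hb ⊢; omega
    have e2 : ∀ L : List Int, L.filter
        (fun k => decide (k > pv ∧
          (c2.foldl (fun d k => d.insert k (d.getD k 0 + 1)) (PySem.Dict.empty : PySem.Dict Int Int)).getD k 0 > 2))
      = L.filter (fun k => decide (k > pv ∧ PySem.List.count c2 k > 2)) := by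
      intro L
      apply List.filter_congr
      intro x _
      rw [decide_eq_decide]
      simp only [countsD]
      constructor <;> rintro ⟨ha, hb⟩ <;> refine ⟨ha, ?_⟩
      · simp at hb ⊢; omega
      · simp at hb ⊢; omega
    simp only [List.nil_append, e1, e2]

-- ===== VERDICT (by name: the statement is the Claim_ definition above) =====
theorem find_double_spec : Claim_equal_find_double := by
  intro pv c2 ri _
  unfold Spec_find_double
  exact main_eq pv c2 ri
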